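-- pv_equiv track=rewrite | github.com/rey282/Cipher-PvP-Discord-Bot | utils/rank_utils.py | get_rank
-- ===== SOURCE A (Python) =====
-- def get_rank(elo_score, player_id=None, elo_data=None):
--     if elo_data and player_id and elo_score >= 1000:
--
--         top_players = sorted(
--             elo_data.items(),
--             key=lambda x: x[1].get("elo", 200),
--             reverse=True
--         )[:3]
--         if any(pid == str(player_id) for pid, _ in top_players):
--             return "Cipher Champion"
--
--     if elo_score < 300:
--         return "Trailblazer"
--     elif 300 <= elo_score < 500:
--         return "Memokeeper"
--     elif 500 <= elo_score < 650:
--         return "Genius Scholar"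
--     elif 650 <= elo_score < 800:
--         return "Arbiter-Generals"
--     elif 800 <= elo_score < 900:
--         return "Emanator"
--     else:
--         return "Aeon"
-- ===== SOURCE B (Python) =====
-- _TIERS = [(300, "Trailblazer"), (500, "Memokeeper"), (650, "Genius Scholar"),
--           (800, "Arbiter-Generals"), (900, "Emanator")]
--
--
-- def get_rank(elo_score, player_id=None, elo_data=None):
--     # Champion check: one O(n) pass counting players ranked ahead of the
--     # target (higher elo, or equal elo and earlier insertion order), instead
--     # of sorting the whole table.
--     if elo_data and player_id and elo_score >= 1000:
--         pid = str(player_id)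
--         stats = elo_data.get(pid)
--         if stats is not None:
--             my = stats.get("elo", 200)
--             ahead = 0
--             seen = False
--             for key, st in elo_data.items():
--                 if key == pid:
--                     seen = True
--                 else:
--                     e = st.get("elo", 200)
--                     if e > my or (e == my and not seen):
--                         ahead += 1
--             if ahead < 3:
--                 return "Cipher Champion"
--     for bound, name in _TIERS:
--         if elo_score < bound:
--             return name
--     return "Aeon"
-- ===== Notes on version B (the rewrite author's own statement) =====
-- stated objective: alternative
-- what changed: Instead of sorting the whole table descending by elo and taking the top 3, B makes a single pass counting the players ranked ahead of the target (higher elo, or equal elo and earlier insertion order) and declares champion iff fewer than 3 are ahead; the tier label comes from a threshold table scan instead of an if/elif chain.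
import Mathlib
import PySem

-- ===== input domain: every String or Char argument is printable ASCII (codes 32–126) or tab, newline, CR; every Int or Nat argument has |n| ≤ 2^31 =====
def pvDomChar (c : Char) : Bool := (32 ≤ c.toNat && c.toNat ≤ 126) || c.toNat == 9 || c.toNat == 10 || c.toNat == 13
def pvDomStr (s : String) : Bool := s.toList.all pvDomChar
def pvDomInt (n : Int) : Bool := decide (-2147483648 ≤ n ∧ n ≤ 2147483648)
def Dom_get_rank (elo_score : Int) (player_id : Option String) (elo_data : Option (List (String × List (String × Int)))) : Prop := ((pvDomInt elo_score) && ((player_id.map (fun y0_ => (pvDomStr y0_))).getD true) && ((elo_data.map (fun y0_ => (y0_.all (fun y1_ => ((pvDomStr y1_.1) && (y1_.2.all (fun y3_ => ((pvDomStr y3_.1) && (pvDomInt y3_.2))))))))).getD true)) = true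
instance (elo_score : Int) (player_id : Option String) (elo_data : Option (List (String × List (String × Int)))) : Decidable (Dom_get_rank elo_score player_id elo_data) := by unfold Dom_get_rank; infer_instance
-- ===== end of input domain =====

-- ===== PORT A =====
-- B replaces A's full descending sort + top-3 scan by a single counting pass; proved equal on tables without duplicate keys.
-- shared helper: x[1].get("elo", 200), the sort key / elo lookup both Pythons use
def eloKey (x : String × List (String × Int)) : Int := (PySem.Dict.mk x.2).getD "elo" 200

def get_rank (elo_score : Int) (player_id : Option String) (elo_data : Option (List (String × List (String × Int)))) : String :=
  let champ : Bool :=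
    match elo_data, player_id with
    | some ed, some pid =>
      if ed ≠ [] ∧ pid ≠ "" ∧ 1000 ≤ elo_score then
        -- top_players = sorted(elo_data.items(), key=..., reverse=True)[:3]
        let top_players := (PySem.List.sorted ed eloKey true).take 3
        -- any(pid == str(player_id) for pid, _ in top_players)
        top_players.any (fun p => p.1 == pid)
      else false
    | _, _ => false
  if champ then "Cipher Champion"
  else if elo_score < 300 then "Trailblazer"
  else if 300 ≤ elo_score ∧ elo_score < 500 then "Memokeeper"
  else if 500 ≤ elo_score ∧ elo_score < 650 then "Genius Scholar"
  else if 650 ≤ elo_score ∧ elo_score < 800 then "Arbiter-Generals"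
  else if 800 ≤ elo_score ∧ elo_score < 900 then "Emanator"
  else "Aeon"

-- ===== PORT B =====
def tiers : List (Int × String) :=
  [(300, "Trailblazer"), (500, "Memokeeper"), (650, "Genius Scholar"),
   (800, "Arbiter-Generals"), (900, "Emanator")]

-- the 'for bound, name in _TIERS' loop
def tierLabel (e : Int) : List (Int × String) → String
  | [] => "Aeon"
  | (b, name) :: rest => if e < b then name else tierLabel e rest

-- one iteration of B's counting loop; state = (ahead, seen)
def aheadStep (pid : String) (my : Int) (st : Int × Bool) (kv : String × List (String × Int)) : Int × Bool :=
  if kv.1 == pid then (st.1, true)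
  else
    let e := eloKey kv
    if e > my ∨ (e = my ∧ st.2 = false) then (st.1 + 1, st.2) else st

def get_rank_alt (elo_score : Int) (player_id : Option String) (elo_data : Option (List (String × List (String × Int)))) : String :=
  let champ : Bool :=
    match elo_data with
    | none => false
    | some ed =>
      match player_id with
      | none => false
      | some pid =>
        if ed ≠ [] ∧ pid ≠ "" ∧ 1000 ≤ elo_score then
          match (PySem.Dict.mk ed).get? pid with
          | some stats =>
            let my := (PySem.Dict.mk stats).getD "elo" 200
            decide ((ed.foldl (aheadStep pid my) (0, false)).1 < 3)
          | none => false
        else false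
  if champ then "Cipher Champion" else tierLabel elo_score tiers

-- ===== PRECONDITION & SPEC =====
-- Pre_ excludes association lists whose outer keys repeat: no Python dict argument can denote such a list (dict construction
-- collapses duplicate keys), so under the dict <-> assoc-list convention A's value there is not defined by the Python source.
def Pre_get_rank (elo_score : Int) (player_id : Option String) (elo_data : Option (List (String × List (String × Int)))) : Prop :=
  ((elo_data.getD []).map Prod.fst).Nodup
instance (elo_score : Int) (player_id : Option String) (elo_data : Option (List (String × List (String × Int)))) : Decidable (Pre_get_rank elo_score player_id elo_data) := by unfold Pre_get_rank; infer_instance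

def pvWitness_get_rank : Int × Option String × (Option (List (String × List (String × Int)))) :=
  (1000, some "p", some [("p", [("elo", 1200)]), ("q", [("elo", 900)])])

def Spec_get_rank (elo_score : Int) (player_id : Option String) (elo_data : Option (List (String × List (String × Int)))) (out : String) : Prop := out = get_rank_alt elo_score player_id elo_data
instance (elo_score : Int) (player_id : Option String) (elo_data : Option (List (String × List (String × Int)))) (out : String) : Decidable (Spec_get_rank elo_score player_id elo_data out) := by unfold Spec_get_rank; infer_instance

-- ===== CLAIM (what is proved, stated in full; the proofs are below) =====
def Claim_equal_get_rank : Prop := ∀ (elo_score : Int) (player_id : Option String) (elo_data : Option (List (String × List (String × Int)))), Dom_get_rank elo_score player_id elo_data → Pre_get_rank elo_score player_id elo_data → Spec_get_rank elo_score player_id elo_data (get_rank elo_score player_id elo_data)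

-- ===== LEMMAS AND PROOFS =====

-- the strict order used by sorted(..., reverse=True)
def revBefore (a b : String × List (String × Int)) : Bool := decide (eloKey b < eloKey a)

-- insertBy inserts before the first element the test accepts
theorem insertBy_eq_takeWhile {α : Type} (before : α → α → Bool) (x : α) (ys : List α) :
    PySem.List.insertBy before x ys =
      ys.takeWhile (fun y => !before x y) ++ x :: ys.dropWhile (fun y => !before x y) := by
  induction ys with
  | nil => rfl
  | cons y ys ih =>
    by_cases h : before x y = true
    · simp [PySem.List.insertBy, h, List.takeWhile, List.dropWhile]
    · simp only [Bool.not_eq_true] at h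
      simp [PySem.List.insertBy, h, List.takeWhile, List.dropWhile, ih]

theorem insertBy_append_left {α : Type} (before : α → α → Bool) (x : α) (as bs : List α)
    (h : ∀ a ∈ as, before x a = false) :
    PySem.List.insertBy before x (as ++ bs) = as ++ PySem.List.insertBy before x bs := by
  induction as with
  | nil => rfl
  | cons a as ih =>
    have ha : before x a = false := h a (by simp)
    simp only [List.cons_append, PySem.List.insertBy, ha, Bool.false_eq_true, if_false]
    rw [ih (fun a' ha' => h a' (by simp [ha']))]

theorem insertBy_mid {α : Type} (before : α → α → Bool) (x b : α) (as v : List α)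
    (h : before x b = true) :
    ∃ u', PySem.List.insertBy before x (as ++ b :: v) = u' ++ b :: v ∧
      u'.length = as.length + 1 ∧ ∀ y ∈ u', y = x ∨ y ∈ as := by
  induction as with
  | nil => exact ⟨[x], by simp [PySem.List.insertBy, h], rfl, by simp⟩
  | cons a as ih =>
    by_cases ha : before x a = true
    · refine ⟨x :: a :: as, by simp [PySem.List.insertBy, ha], by simp, ?_⟩
      intro y hy
      rcases List.mem_cons.mp hy with rfl | hy
      · exact Or.inl rfl
      · exact Or.inr hy
    · obtain ⟨u', hu, hl, hm⟩ := ih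
      simp only [Bool.not_eq_true] at ha
      refine ⟨a :: u', ?_, by simpa using hl, ?_⟩
      · simp only [List.cons_append, PySem.List.insertBy, ha, Bool.false_eq_true, if_false]
        rw [hu]
      · intro y hy
        rcases List.mem_cons.mp hy with rfl | hy
        · exact Or.inr (by simp)
        · rcases hm y hy with rfl | hy'
          · exact Or.inl rfl
          · exact Or.inr (by simp [hy'])

theorem len_takeWhile_eq_countP (my : Int) (l : List (String × List (String × Int)))
    (hp : l.Pairwise (fun a b => eloKey b ≤ eloKey a)) :
    (l.takeWhile (fun y => decide (my ≤ eloKey y))).length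
      = l.countP (fun y => decide (my ≤ eloKey y)) := by
  induction l with
  | nil => rfl
  | cons a l ih =>
    rcases List.pairwise_cons.mp hp with ⟨hall, htl⟩
    by_cases h : my ≤ eloKey a
    · simp [List.takeWhile, h, ih htl]
    · have hz : List.countP (fun y => decide (my ≤ eloKey y)) l = 0 := by
        apply List.countP_eq_zero.mpr
        intro y hy
        have := hall y hy
        simp only [decide_eq_true_eq]
        omega
      simp [List.takeWhile, h, hz]

-- the "seen" split maintained on the sorted accumulator
def Good (pid : String) (my : Int) (s : List (String × List (String × Int))) (n : Nat) : Prop :=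
  ∃ u t v, s = u ++ t :: v ∧ t.1 = pid ∧ eloKey t = my ∧ u.length = n ∧
    ∀ y ∈ u, my ≤ eloKey y ∧ y.1 ≠ pid

theorem good_step (pid : String) (my : Int) (s : List (String × List (String × Int))) (n : Nat)
    (x : String × List (String × Int)) (hx : x.1 ≠ pid) (hg : Good pid my s n) :
    Good pid my (PySem.List.insertBy revBefore x s)
      (if my < eloKey x then n + 1 else n) := by
  obtain ⟨u, t, v, rfl, ht, htk, hl, hu⟩ := hg
  by_cases h : my < eloKey x
  · have hb : revBefore x t = true := by
      simp only [revBefore, decide_eq_true_eq, htk]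
      exact h
    obtain ⟨u', hu', hl', hm'⟩ := insertBy_mid revBefore x t u v hb
    rw [if_pos h]
    refine ⟨u', t, v, hu', ht, htk, by omega, ?_⟩
    intro y hy
    rcases hm' y hy with rfl | hy'
    · exact ⟨le_of_lt h, hx⟩
    · exact hu y hy'
  · have hfail : ∀ a ∈ u ++ [t], revBefore x a = false := by
      intro a ha
      simp only [revBefore, decide_eq_false_iff_not, not_lt]
      rcases List.mem_append.mp ha with ha | ha
      · have := (hu a ha).1
        omega
      · simp only [List.mem_singleton] at ha
        subst ha
        omega
    have hsplit : u ++ t :: v = (u ++ [t]) ++ v := by simp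
    rw [if_neg h, hsplit, insertBy_append_left revBefore x (u ++ [t]) v hfail]
    exact ⟨u, t, PySem.List.insertBy revBefore x v, by simp, ht, htk, hl, hu⟩

theorem good_fold (pid : String) (my : Int) (post : List (String × List (String × Int)))
    (hpost : ∀ y ∈ post, y.1 ≠ pid) :
    ∀ (s : List (String × List (String × Int))) (n : Nat), Good pid my s n →
    Good pid my (post.foldl (fun acc x => PySem.List.insertBy revBefore x acc) s)
      (n + post.countP (fun y => decide (my < eloKey y))) := by
  induction post with
  | nil => intro s n hg; simpa using hg
  | cons x post ih =>
    intro s n hg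
    have hstep := good_step pid my s n x (hpost x (by simp)) hg
    have hrec := ih (fun y hy => hpost y (by simp [hy]))
      (PySem.List.insertBy revBefore x s) (if my < eloKey x then n + 1 else n) hstep
    simp only [List.foldl_cons, List.countP_cons]
    by_cases h : my < eloKey x
    · have : n + 1 + List.countP (fun y => decide (my < eloKey y)) post
          = n + (List.countP (fun y => decide (my < eloKey y)) post + if decide (my < eloKey x) then 1 else 0) := by
        simp [h]
        omega
      rw [← this]
      simpa [h] using hrec
    · have : n + List.countP (fun y => decide (my < eloKey y)) post
          = n + (List.countP (fun y => decide (my < eloKey y)) post + if decide (my < eloKey x) then 1 else 0) := by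
        simp [h]
      rw [← this]
      simpa [h] using hrec

-- B's loop, before the target is met
theorem aheadStep_fold_unseen (pid : String) (my : Int) (pre : List (String × List (String × Int)))
    (hpre : ∀ y ∈ pre, y.1 ≠ pid) :
    ∀ a : Int, pre.foldl (aheadStep pid my) (a, false)
      = (a + (pre.countP (fun y => decide (my ≤ eloKey y)) : Int), false) := by
  induction pre with
  | nil => intro a; simp
  | cons x pre ih =>
    intro a
    have hx : (x.1 == pid) = false := by simpa using hpre x (by simp)
    have ihx := ih (fun y hy => hpre y (by simp [hy]))
    by_cases h : my ≤ eloKey x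
    · have hstep : aheadStep pid my (a, false) x = (a + 1, false) := by
        have hc : eloKey x > my ∨ (eloKey x = my ∧ True) := by
          rcases lt_or_eq_of_le h with h' | h'
          · exact Or.inl h'
          · exact Or.inr ⟨h'.symm, trivial⟩
        simp only [aheadStep, hx, Bool.false_eq_true, if_false]
        rw [if_pos hc]
      rw [List.foldl_cons, hstep, ihx (a + 1), List.countP_cons]
      simp only [decide_eq_true_eq, if_pos h]
      congr 1
      push_cast
      ring
    · have hstep : aheadStep pid my (a, false) x = (a, false) := by
        have hc : ¬ (eloKey x > my ∨ (eloKey x = my ∧ True)) := by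
          rintro (h' | ⟨h', -⟩) <;> omega
        simp only [aheadStep, hx, Bool.false_eq_true, if_false]
        rw [if_neg hc]
      rw [List.foldl_cons, hstep, ihx a, List.countP_cons]
      simp [h]

-- B's loop, after the target is met
theorem aheadStep_fold_seen (pid : String) (my : Int) (post : List (String × List (String × Int)))
    (hpost : ∀ y ∈ post, y.1 ≠ pid) :
    ∀ a : Int, post.foldl (aheadStep pid my) (a, true)
      = (a + (post.countP (fun y => decide (my < eloKey y)) : Int), true) := by
  induction post with
  | nil => intro a; simp
  | cons x post ih =>
    intro a
    have hx : (x.1 == pid) = false := by simpa using hpost x (by simp)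
    have ihx := ih (fun y hy => hpost y (by simp [hy]))
    by_cases h : my < eloKey x
    · have hstep : aheadStep pid my (a, true) x = (a + 1, true) := by
        simp [aheadStep, hx, Or.inl h]
      rw [List.foldl_cons, hstep, ihx (a + 1), List.countP_cons]
      simp only [decide_eq_true_eq, if_pos h]
      congr 1
      push_cast
      ring
    · have hstep : aheadStep pid my (a, true) x = (a, true) := by
        have hc : ¬ (eloKey x > my ∨ (eloKey x = my ∧ true = false)) := by
          rintro (h' | ⟨-, h'⟩)
          · omega
          · exact absurd h' (by simp)
        simp only [aheadStep, hx, Bool.false_eq_true, if_false]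
        rw [if_neg hc]
      rw [List.foldl_cons, hstep, ihx a, List.countP_cons]
      simp [h]

-- first-match decomposition of the dict lookup
theorem dict_get?_some_split (ed : List (String × List (String × Int))) (pid : String)
    (stats : List (String × Int)) (h : (PySem.Dict.mk ed).get? pid = some stats) :
    ∃ pre post, ed = pre ++ (pid, stats) :: post ∧ ∀ y ∈ pre, y.1 ≠ pid := by
  induction ed with
  | nil => simp [PySem.Dict.get?] at h
  | cons x ed ih =>
    rw [PySem.Dict.get?_mk_cons] at h
    by_cases hx : x.1 == pid
    · refine ⟨[], ed, ?_, by simp⟩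
      simp only [hx, if_pos] at h
      obtain ⟨k, v⟩ := x
      simp only [Option.some.injEq] at h
      simp_all
    · simp only [hx, Bool.false_eq_true, if_false] at h
      obtain ⟨pre, post, rfl, hpre⟩ := ih h
      exact ⟨x :: pre, post, rfl, by
        intro y hy
        rcases List.mem_cons.mp hy with rfl | hy
        · simpa using hx
        · exact hpre y hy⟩

theorem dict_get?_none (ed : List (String × List (String × Int))) (pid : String)
    (h : (PySem.Dict.mk ed).get? pid = none) : ∀ y ∈ ed, y.1 ≠ pid := by
  induction ed with
  | nil => simp
  | cons x ed ih =>
    rw [PySem.Dict.get?_mk_cons] at h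
    by_cases hx : x.1 == pid
    · simp [hx] at h
    · intro y hy
      rcases List.mem_cons.mp hy with rfl | hy
      · simpa using hx
      · exact ih (by simpa [hx] using h) y hy

-- membership of the target in the first three of the split list
theorem good_take3 (pid : String) (my : Int) (s : List (String × List (String × Int))) (n : Nat)
    (hg : Good pid my s n) :
    (s.take 3).any (fun p => p.1 == pid) = decide (n < 3) := by
  obtain ⟨u, t, v, rfl, ht, -, hl, hu⟩ := hg
  have hp : ∀ y ∈ u, (y.1 == pid) = false := by
    intro y hy
    simpa using (hu y hy).2
  subst hl
  rcases u with _ | ⟨a, _ | ⟨b, _ | ⟨c, u⟩⟩⟩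
  · simp [ht]
  · simp [List.any_cons, hp a (by simp), ht]
  · simp [List.any_cons, hp a (by simp), hp b (by simp), ht]
  · have h3 : ¬ ((a :: b :: c :: u).length < 3) := by simp
    simp only [List.cons_append, List.take_succ_cons, List.take_zero, List.any_cons,
      List.any_nil, hp a (by simp), hp b (by simp), hp c (by simp), Bool.or_self,
      decide_eq_false h3]

-- the heart of the file: champion test of A = champion test of B
theorem champ_eq (ed : List (String × List (String × Int))) (pid : String)
    (hnd : (ed.map Prod.fst).Nodup) :
    ((PySem.List.sorted ed eloKey true).take 3).any (fun p => p.1 == pid)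
      = (match (PySem.Dict.mk ed).get? pid with
         | some stats =>
            decide ((ed.foldl (aheadStep pid ((PySem.Dict.mk stats).getD "elo" 200)) (0, false)).1 < 3)
         | none => false) := by
  cases hget : (PySem.Dict.mk ed).get? pid with
  | none =>
    have hall := dict_get?_none ed pid hget
    show _ = false
    apply List.any_eq_false.mpr
    intro y hy
    have hy' : y ∈ ed := (PySem.List.mem_sorted ed eloKey true y).mp (List.mem_of_mem_take hy)
    simpa using hall y hy'
  | some stats =>
    show _ = decide _
    obtain ⟨pre, post, hed, hpre⟩ := dict_get?_some_split ed pid stats hget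
    have htk : eloKey (pid, stats) = (PySem.Dict.mk stats).getD "elo" 200 := rfl
    have hpost : ∀ y ∈ post, y.1 ≠ pid := by
      intro y hy hEq
      have hnd' := hnd
      rw [hed] at hnd'
      simp only [List.map_append, List.map_cons] at hnd'
      have h2 := (List.nodup_append.mp hnd').2.1
      exact (List.nodup_cons.mp h2).1 (List.mem_map.mpr ⟨y, hy, hEq⟩)
    have hB : (ed.foldl (aheadStep pid ((PySem.Dict.mk stats).getD "elo" 200)) ((0 : Int), false)).1
        = ((pre.countP (fun y => decide ((PySem.Dict.mk stats).getD "elo" 200 ≤ eloKey y)) : Int)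
          + (post.countP (fun y => decide ((PySem.Dict.mk stats).getD "elo" 200 < eloKey y)) : Int)) := by
      rw [hed, List.foldl_append,
        aheadStep_fold_unseen pid _ pre hpre 0, List.foldl_cons]
      have hstep : ∀ a : Int, aheadStep pid ((PySem.Dict.mk stats).getD "elo" 200) (a, false) (pid, stats)
          = (a, true) := by
        intro a
        simp [aheadStep]
      rw [hstep, aheadStep_fold_seen pid _ post hpost]
      simp only
      ring
    have hsorted : PySem.List.sorted ed eloKey true
        = (pre ++ (pid, stats) :: post).foldl
            (fun acc x => PySem.List.insertBy revBefore x acc) [] := by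
      rw [← hed]
      exact PySem.List.sorted_rev_eq_foldl_insertBy ed eloKey
    have hGood : Good pid ((PySem.Dict.mk stats).getD "elo" 200) (PySem.List.sorted ed eloKey true)
        (pre.countP (fun y => decide ((PySem.Dict.mk stats).getD "elo" 200 ≤ eloKey y))
          + post.countP (fun y => decide ((PySem.Dict.mk stats).getD "elo" 200 < eloKey y))) := by
      rw [hsorted, List.foldl_append, List.foldl_cons]
      apply good_fold _ _ post hpost
      have hpre_sorted : pre.foldl (fun acc x => PySem.List.insertBy revBefore x acc) []
          = PySem.List.sorted pre eloKey true :=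
        (PySem.List.sorted_rev_eq_foldl_insertBy pre eloKey).symm
      rw [hpre_sorted, insertBy_eq_takeWhile]
      have hpredeq : (fun y => !revBefore (pid, stats) y)
          = (fun y : String × List (String × Int) =>
              decide ((PySem.Dict.mk stats).getD "elo" 200 ≤ eloKey y)) := by
        funext y
        by_cases h : (PySem.Dict.mk stats).getD "elo" 200 ≤ eloKey y
        · have h1 : ¬ (eloKey y < (PySem.Dict.mk stats).getD "elo" 200) := by omega
          simp [revBefore, htk, h, h1]
        · have h1 : eloKey y < (PySem.Dict.mk stats).getD "elo" 200 := by omega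
          simp [revBefore, htk, h, h1]
      rw [hpredeq]
      refine ⟨_, (pid, stats), _, rfl, rfl, htk, ?_, ?_⟩
      · rw [len_takeWhile_eq_countP _ _ (PySem.List.sorted_pairwise_rev pre eloKey)]
        exact (PySem.List.sorted_perm pre eloKey true).countP_eq _
      · intro y hy
        refine ⟨by simpa using List.mem_takeWhile_imp hy, ?_⟩
        have hmem : y ∈ pre := (PySem.List.mem_sorted pre eloKey true y).mp
          ((List.takeWhile_sublist _).subset hy)
        exact hpre y hmem
    rw [good_take3 _ _ _ _ hGood, hB]
    apply decide_eq_decide.mpr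
    omega

theorem tier_eq (e : Int) :
    (if e < 300 then "Trailblazer"
     else if 300 ≤ e ∧ e < 500 then "Memokeeper"
     else if 500 ≤ e ∧ e < 650 then "Genius Scholar"
     else if 650 ≤ e ∧ e < 800 then "Arbiter-Generals"
     else if 800 ≤ e ∧ e < 900 then "Emanator"
     else "Aeon") = tierLabel e tiers := by
  simp only [tiers, tierLabel]
  split_ifs <;> first | rfl | omega

-- ===== VERDICT (by name: the statement is the Claim_ definition above) =====
theorem get_rank_spec : Claim_equal_get_rank := by
  intro elo_score player_id elo_data _hdom hpre
  unfold Spec_get_rank get_rank get_rank_alt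
  match elo_data, player_id with
  | none, _ => simp only [tier_eq elo_score]
  | some ed, none => simp only [tier_eq elo_score]
  | some ed, some pid =>
    by_cases hg : ed ≠ [] ∧ pid ≠ "" ∧ 1000 ≤ elo_score
    · have hnd : (ed.map Prod.fst).Nodup := by simpa [Pre_get_rank] using hpre
      simp only [if_pos hg, champ_eq ed pid hnd, tier_eq elo_score]
    · simp only [if_neg hg, tier_eq elo_score]
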